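-- pv_equiv track=rewrite | github.com/nymessence/elyria-tts | intelligent_image_generator.py | generate_smart_prompt
-- ===== SOURCE A (Python) =====
-- def generate_smart_prompt(sentence: str, context: str = "") -> str:
--     """
--     Generate intelligent image prompts based on text content
--     """
--     sentence_lower = sentence.lower()
--
--     # Analyze the sentence to generate an appropriate image prompt
--     if any(word in sentence_lower for word in ["happy", "cheerful", "joy", "celebrate", "delighted"]):
--         return "A bright, cheerful scene with vibrant colors representing happiness, joyful expressions, and positive emotions"
--     elif any(word in sentence_lower for word in ["sad", "melancholy", "depressed", "gloomy", "heartbroken"]):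
--         return "A muted, melancholic scene with soft lighting representing sadness, thoughtful expressions, and gentle emotions"
--     elif any(word in sentence_lower for word in ["exciting", "energetic", "excited", "thrilling", "dynamic"]):
--         return "An energetic, dynamic scene with vivid colors representing excitement, motion, and high energy"
--     elif any(word in sentence_lower for word in ["tired", "sleepy", "exhausted", "rest", "relax"]):
--         return "A cozy, sleepy scene with warm lighting representing rest, relaxation, and peaceful emotions"
--     elif any(word in sentence_lower for word in ["surprise", "amazed", "wow", "astonished", "shocked"]):
--         return "A scene showing surprise or amazement with dramatic lighting and expressive elements"
--     elif any(word in sentence_lower for word in ["love", "affection", "romance", "caring", "affectionate"]):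
--         return "A warm, loving scene with soft lighting and affectionate elements"
--     elif any(word in sentence_lower for word in ["anger", "mad", "furious", "rage", "irate"]):
--         return "A scene representing strong emotions with bold colors and intense expressions"
--     elif any(word in sentence_lower for word in ["nature", "forest", "mountains", "lake", "river", "garden", "park"]):
--         return "Beautiful nature scene with forests, mountains, lakes, and natural elements"
--     elif any(word in sentence_lower for word in ["city", "urban", "building", "street", "metropolis", "skyscraper"]):
--         return "Modern cityscape with buildings, urban environment, and metropolitan elements"
--     elif any(word in sentence_lower for word in ["technology", "computer", "digital", "robot", "ai", "future"]):
--         return "Futuristic technology scene with computers, digital interfaces, and high-tech elements"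
--     elif any(word in sentence_lower for word in ["food", "meal", "restaurant", "cooking", "delicious"]):
--         return "Delicious food scene with appetizing presentation and warm lighting"
--     elif any(word in sentence_lower for word in ["music", "concert", "song", "instrument", "singing"]):
--         return "Musical scene with instruments, concert atmosphere, and rhythmic elements"
--     elif any(word in sentence_lower for word in ["sports", "game", "exercise", "competition", "athletic"]):
--         return "Sports scene with athletic activity, competition, and dynamic movement"
--     else:
--         # General prompt based on context
--         return f"Scene representing: {sentence}. Context: {context}. Highly detailed, realistic, vibrant colors, professional photography"
-- ===== SOURCE B (Python) =====
-- # Flat inverted keyword index (alphabetical) -> rule priority; pick the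
-- # minimum-priority matching keyword instead of cascading grouped checks.
--
-- PROMPTS = [
--     'A bright, cheerful scene with vibrant colors representing happiness, joyful expressions, and positive emotions',
--     'A muted, melancholic scene with soft lighting representing sadness, thoughtful expressions, and gentle emotions',
--     'An energetic, dynamic scene with vivid colors representing excitement, motion, and high energy',
--     'A cozy, sleepy scene with warm lighting representing rest, relaxation, and peaceful emotions',
--     'A scene showing surprise or amazement with dramatic lighting and expressive elements',
--     'A warm, loving scene with soft lighting and affectionate elements',
--     'A scene representing strong emotions with bold colors and intense expressions',
--     'Beautiful nature scene with forests, mountains, lakes, and natural elements',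
--     'Modern cityscape with buildings, urban environment, and metropolitan elements',
--     'Futuristic technology scene with computers, digital interfaces, and high-tech elements',
--     'Delicious food scene with appetizing presentation and warm lighting',
--     'Musical scene with instruments, concert atmosphere, and rhythmic elements',
--     'Sports scene with athletic activity, competition, and dynamic movement',
-- ]
--
-- # keyword -> priority of its rule, listed alphabetically (order is irrelevant:
-- # the scan selects the minimum priority among all matches)
-- KEYWORD_INDEX = [
--     ('affection', 5),
--     ('affectionate', 5),
--     ('ai', 9),
--     ('amazed', 4),
--     ('anger', 6),
--     ('astonished', 4),
--     ('athletic', 12),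
--     ('building', 8),
--     ('caring', 5),
--     ('celebrate', 0),
--     ('cheerful', 0),
--     ('city', 8),
--     ('competition', 12),
--     ('computer', 9),
--     ('concert', 11),
--     ('cooking', 10),
--     ('delicious', 10),
--     ('delighted', 0),
--     ('depressed', 1),
--     ('digital', 9),
--     ('dynamic', 2),
--     ('energetic', 2),
--     ('excited', 2),
--     ('exciting', 2),
--     ('exercise', 12),
--     ('exhausted', 3),
--     ('food', 10),
--     ('forest', 7),
--     ('furious', 6),
--     ('future', 9),
--     ('game', 12),
--     ('garden', 7),
--     ('gloomy', 1),
--     ('happy', 0),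
--     ('heartbroken', 1),
--     ('instrument', 11),
--     ('irate', 6),
--     ('joy', 0),
--     ('lake', 7),
--     ('love', 5),
--     ('mad', 6),
--     ('meal', 10),
--     ('melancholy', 1),
--     ('metropolis', 8),
--     ('mountains', 7),
--     ('music', 11),
--     ('nature', 7),
--     ('park', 7),
--     ('rage', 6),
--     ('relax', 3),
--     ('rest', 3),
--     ('restaurant', 10),
--     ('river', 7),
--     ('robot', 9),
--     ('romance', 5),
--     ('sad', 1),
--     ('shocked', 4),
--     ('singing', 11),
--     ('skyscraper', 8),
--     ('sleepy', 3),
--     ('song', 11),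
--     ('sports', 12),
--     ('street', 8),
--     ('surprise', 4),
--     ('technology', 9),
--     ('thrilling', 2),
--     ('tired', 3),
--     ('urban', 8),
--     ('wow', 4),
-- ]
--
-- def generate_smart_prompt(sentence: str, context: str = "") -> str:
--     s = sentence.lower()
--     best = None
--     for kw, pri in KEYWORD_INDEX:
--         if kw in s and (best is None or pri < best):
--             best = pri
--     if best is None:
--         return f"Scene representing: {sentence}. Context: {context}. Highly detailed, realistic, vibrant colors, professional photography"
--     return PROMPTS[best]
-- ===== Notes on version B (the rewrite author's own statement) =====
-- stated objective: alternative
-- what changed: Replaces the 13-branch if/elif cascade of grouped any() checks with a flat alphabetical keyword->priority index scanned in one pass that keeps the minimum matching priority and looks the prompt up in a PROMPTS table; selection is order-independent instead of relying on branch order.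
import Mathlib
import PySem

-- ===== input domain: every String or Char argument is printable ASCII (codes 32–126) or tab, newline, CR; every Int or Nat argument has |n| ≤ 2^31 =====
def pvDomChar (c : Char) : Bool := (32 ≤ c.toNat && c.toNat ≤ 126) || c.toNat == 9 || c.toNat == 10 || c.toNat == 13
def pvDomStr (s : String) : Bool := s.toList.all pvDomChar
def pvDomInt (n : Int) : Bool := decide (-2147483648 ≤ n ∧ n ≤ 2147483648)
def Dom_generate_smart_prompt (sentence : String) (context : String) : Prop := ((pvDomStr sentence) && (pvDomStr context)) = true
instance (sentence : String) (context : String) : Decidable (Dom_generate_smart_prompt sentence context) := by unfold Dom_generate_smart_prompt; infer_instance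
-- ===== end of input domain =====

-- B replaces A's 13-branch grouped if/elif cascade by a flat alphabetical keyword->priority
-- index scanned once, selecting the minimum-priority matching keyword (objective: alternative).

-- ===== PORT A =====
-- one helper per Python 'any(word in sentence_lower for word in [...])'
def pvAnyIn (ws : List String) (s : String) : Bool :=
  ws.any (fun word => PySem.Str.isIn word s)

def generate_smart_prompt (sentence : String) (context : String) : String :=
  let sentence_lower := PySem.Str.lower sentence
  if pvAnyIn ["happy", "cheerful", "joy", "celebrate", "delighted"] sentence_lower then
    "A bright, cheerful scene with vibrant colors representing happiness, joyful expressions, and positive emotions"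
  else if pvAnyIn ["sad", "melancholy", "depressed", "gloomy", "heartbroken"] sentence_lower then
    "A muted, melancholic scene with soft lighting representing sadness, thoughtful expressions, and gentle emotions"
  else if pvAnyIn ["exciting", "energetic", "excited", "thrilling", "dynamic"] sentence_lower then
    "An energetic, dynamic scene with vivid colors representing excitement, motion, and high energy"
  else if pvAnyIn ["tired", "sleepy", "exhausted", "rest", "relax"] sentence_lower then
    "A cozy, sleepy scene with warm lighting representing rest, relaxation, and peaceful emotions"
  else if pvAnyIn ["surprise", "amazed", "wow", "astonished", "shocked"] sentence_lower then
    "A scene showing surprise or amazement with dramatic lighting and expressive elements"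
  else if pvAnyIn ["love", "affection", "romance", "caring", "affectionate"] sentence_lower then
    "A warm, loving scene with soft lighting and affectionate elements"
  else if pvAnyIn ["anger", "mad", "furious", "rage", "irate"] sentence_lower then
    "A scene representing strong emotions with bold colors and intense expressions"
  else if pvAnyIn ["nature", "forest", "mountains", "lake", "river", "garden", "park"] sentence_lower then
    "Beautiful nature scene with forests, mountains, lakes, and natural elements"
  else if pvAnyIn ["city", "urban", "building", "street", "metropolis", "skyscraper"] sentence_lower then
    "Modern cityscape with buildings, urban environment, and metropolitan elements"
  else if pvAnyIn ["technology", "computer", "digital", "robot", "ai", "future"] sentence_lower then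
    "Futuristic technology scene with computers, digital interfaces, and high-tech elements"
  else if pvAnyIn ["food", "meal", "restaurant", "cooking", "delicious"] sentence_lower then
    "Delicious food scene with appetizing presentation and warm lighting"
  else if pvAnyIn ["music", "concert", "song", "instrument", "singing"] sentence_lower then
    "Musical scene with instruments, concert atmosphere, and rhythmic elements"
  else if pvAnyIn ["sports", "game", "exercise", "competition", "athletic"] sentence_lower then
    "Sports scene with athletic activity, competition, and dynamic movement"
  else
    "Scene representing: " ++ sentence ++ ". Context: " ++ context ++
      ". Highly detailed, realistic, vibrant colors, professional photography"

-- ===== PORT B =====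
-- the PROMPTS table of Source B
def pvPrompts : List String :=
  [ "A bright, cheerful scene with vibrant colors representing happiness, joyful expressions, and positive emotions",
    "A muted, melancholic scene with soft lighting representing sadness, thoughtful expressions, and gentle emotions",
    "An energetic, dynamic scene with vivid colors representing excitement, motion, and high energy",
    "A cozy, sleepy scene with warm lighting representing rest, relaxation, and peaceful emotions",
    "A scene showing surprise or amazement with dramatic lighting and expressive elements",
    "A warm, loving scene with soft lighting and affectionate elements",
    "A scene representing strong emotions with bold colors and intense expressions",
    "Beautiful nature scene with forests, mountains, lakes, and natural elements",
    "Modern cityscape with buildings, urban environment, and metropolitan elements",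
    "Futuristic technology scene with computers, digital interfaces, and high-tech elements",
    "Delicious food scene with appetizing presentation and warm lighting",
    "Musical scene with instruments, concert atmosphere, and rhythmic elements",
    "Sports scene with athletic activity, competition, and dynamic movement" ]
-- the alphabetical KEYWORD_INDEX table of Source B
def pvKeywordIndex : List (String × Nat) :=
  [ ("affection", 5),
    ("affectionate", 5),
    ("ai", 9),
    ("amazed", 4),
    ("anger", 6),
    ("astonished", 4),
    ("athletic", 12),
    ("building", 8),
    ("caring", 5),
    ("celebrate", 0),
    ("cheerful", 0),
    ("city", 8),
    ("competition", 12),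
    ("computer", 9),
    ("concert", 11),
    ("cooking", 10),
    ("delicious", 10),
    ("delighted", 0),
    ("depressed", 1),
    ("digital", 9),
    ("dynamic", 2),
    ("energetic", 2),
    ("excited", 2),
    ("exciting", 2),
    ("exercise", 12),
    ("exhausted", 3),
    ("food", 10),
    ("forest", 7),
    ("furious", 6),
    ("future", 9),
    ("game", 12),
    ("garden", 7),
    ("gloomy", 1),
    ("happy", 0),
    ("heartbroken", 1),
    ("instrument", 11),
    ("irate", 6),
    ("joy", 0),
    ("lake", 7),
    ("love", 5),
    ("mad", 6),
    ("meal", 10),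
    ("melancholy", 1),
    ("metropolis", 8),
    ("mountains", 7),
    ("music", 11),
    ("nature", 7),
    ("park", 7),
    ("rage", 6),
    ("relax", 3),
    ("rest", 3),
    ("restaurant", 10),
    ("river", 7),
    ("robot", 9),
    ("romance", 5),
    ("sad", 1),
    ("shocked", 4),
    ("singing", 11),
    ("skyscraper", 8),
    ("sleepy", 3),
    ("song", 11),
    ("sports", 12),
    ("street", 8),
    ("surprise", 4),
    ("technology", 9),
    ("thrilling", 2),
    ("tired", 3),
    ("urban", 8),
    ("wow", 4) ]
-- the body of Source B's loop: 'if kw in s and (best is None or pri < best): best = pri'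
def pvStep (s : String) (best : Option Nat) (e : String × Nat) : Option Nat :=
  if PySem.Str.isIn e.1 s && (match best with | none => true | some b => decide (e.2 < b)) then
    some e.2
  else best

def generate_smart_prompt_alt (sentence : String) (context : String) : String :=
  let s := PySem.Str.lower sentence
  match pvKeywordIndex.foldl (pvStep s) none with
  | none =>
      "Scene representing: " ++ sentence ++ ". Context: " ++ context ++
        ". Highly detailed, realistic, vibrant colors, professional photography"
  | some best =>
      -- PROMPTS[best]; best is a priority from the index, always < 13, so Python never raises
      (PySem.List.pyGet? pvPrompts (best : Int)).getD ""

-- ===== PRECONDITION & SPEC =====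
def Spec_generate_smart_prompt (sentence : String) (context : String) (out : String) : Prop := out = generate_smart_prompt_alt sentence context
instance (sentence : String) (context : String) (out : String) : Decidable (Spec_generate_smart_prompt sentence context out) := by unfold Spec_generate_smart_prompt; infer_instance

-- ===== CLAIM (what is proved, stated in full; the proofs are below) =====
def Claim_equal_generate_smart_prompt : Prop := ∀ (sentence : String) (context : String), Dom_generate_smart_prompt sentence context → Spec_generate_smart_prompt sentence context (generate_smart_prompt sentence context)

-- ===== LEMMAS AND PROOFS =====

-- A's rule groups in cascade order, and their flattening into (keyword, priority) pairs
def pvGroups : List (List String) :=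
  [ ["happy", "cheerful", "joy", "celebrate", "delighted"],
    ["sad", "melancholy", "depressed", "gloomy", "heartbroken"],
    ["exciting", "energetic", "excited", "thrilling", "dynamic"],
    ["tired", "sleepy", "exhausted", "rest", "relax"],
    ["surprise", "amazed", "wow", "astonished", "shocked"],
    ["love", "affection", "romance", "caring", "affectionate"],
    ["anger", "mad", "furious", "rage", "irate"],
    ["nature", "forest", "mountains", "lake", "river", "garden", "park"],
    ["city", "urban", "building", "street", "metropolis", "skyscraper"],
    ["technology", "computer", "digital", "robot", "ai", "future"],
    ["food", "meal", "restaurant", "cooking", "delicious"],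
    ["music", "concert", "song", "instrument", "singing"],
    ["sports", "game", "exercise", "competition", "athletic"] ]

def pvFlatten : Nat → List (List String) → List (String × Nat)
  | _, [] => []
  | j, ws :: gs => ws.map (fun w => (w, j)) ++ pvFlatten (j + 1) gs

-- the priority returned by A's cascade, as an Option
def pvFirst (s : String) : Nat → List (List String) → Option Nat
  | _, [] => none
  | j, ws :: gs => if pvAnyIn ws s then some j else pvFirst s (j + 1) gs

-- pvStep is right-commutative: it computes a minimum over matched priorities
theorem pvStep_rightComm (s : String) (z : Option Nat) (x y : String × Nat) :
    pvStep s (pvStep s z x) y = pvStep s (pvStep s z y) x := by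
  rcases z with _ | b <;>
    by_cases h1 : PySem.Str.isIn x.1 s <;>
    by_cases h2 : PySem.Str.isIn y.1 s <;>
    simp only [pvStep, h1, h2, Bool.false_and, Bool.true_and, Bool.and_self] <;>
    try rfl
  all_goals split_ifs <;> (try rfl) <;> simp_all <;> omega

-- folding one rule's keyword block
theorem pvFold_group (s : String) (ws : List String) (j : Nat) (acc : Option Nat)
    (h : ∀ b, acc = some b → b ≤ j) :
    List.foldl (pvStep s) acc (ws.map (fun w => (w, j))) =
      match acc with
      | some b => some b
      | none => if pvAnyIn ws s then some j else none := by
  induction ws generalizing acc with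
  | nil => rcases acc with _ | b <;> simp [pvAnyIn]
  | cons w ws ih =>
    rcases acc with _ | b
    · simp only [List.map_cons, List.foldl_cons, pvStep, Bool.and_true]
      cases hw : PySem.Str.isIn w s with
      | true =>
        rw [show (if true = true then some j else none) = some j from rfl,
            ih (some j) (fun b hb => by cases hb; exact Nat.le_refl j)]
        simp only [pvAnyIn, List.any_cons, hw, Bool.true_or]
        rfl
      | false =>
        rw [show (if false = true then some j else none) = none from rfl,
            ih none (fun b hb => nomatch hb)]
        simp only [pvAnyIn, List.any_cons, hw, Bool.false_or]
        rfl
    · have hb := h b rfl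
      have hlt : (decide (j < b)) = false := by simp; omega
      simp only [List.map_cons, List.foldl_cons, pvStep, hlt, Bool.and_false,
        Bool.false_eq_true, if_false]
      exact ih (some b) h

-- folding the flattened cascade computes the cascade's first match
theorem pvFold_flatten (s : String) (gs : List (List String)) (j : Nat) (acc : Option Nat)
    (h : ∀ b, acc = some b → b ≤ j) :
    List.foldl (pvStep s) acc (pvFlatten j gs) =
      match acc with
      | some b => some b
      | none => pvFirst s j gs := by
  induction gs generalizing j acc with
  | nil => rcases acc with _ | b <;> simp [pvFlatten, pvFirst]
  | cons ws gs ih =>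
    rw [pvFlatten, List.foldl_append, pvFold_group s ws j acc h]
    rcases acc with _ | b
    · by_cases hw : pvAnyIn ws s
      · rw [if_pos hw, ih (j + 1) (some j) (fun b hb => by cases hb; omega)]
        simp [pvFirst, hw]
      · rw [if_neg hw, ih (j + 1) none (fun b hb => nomatch hb)]
        simp [pvFirst, hw]
    · rw [ih (j + 1) (some b) (fun b' hb => by cases hb; exact le_trans (h _ rfl) (by omega))]

-- the alphabetical index is a rearrangement of the flattened cascade
theorem pvIndex_perm : pvKeywordIndex.Perm (pvFlatten 0 pvGroups) := by decide

theorem pvFold_index (s : String) :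
    List.foldl (pvStep s) none pvKeywordIndex = pvFirst s 0 pvGroups := by
  haveI : RightCommutative (pvStep s) := ⟨fun z x y => pvStep_rightComm s z x y⟩
  rw [List.Perm.foldl_eq pvIndex_perm,
      pvFold_flatten s pvGroups 0 none (fun b hb => by cases hb)]

-- ===== VERDICT (by name: the statement is the Claim_ definition above) =====
set_option maxHeartbeats 2000000 in
theorem generate_smart_prompt_spec : Claim_equal_generate_smart_prompt := by
  intro sentence context _
  unfold Spec_generate_smart_prompt generate_smart_prompt generate_smart_prompt_alt
  dsimp only
  rw [pvFold_index]
  simp only [pvGroups, pvFirst]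
  by_cases h0 : pvAnyIn ["happy", "cheerful", "joy", "celebrate", "delighted"] (PySem.Str.lower sentence) = true
  · rw [if_pos h0, if_pos h0]
    try rfl
  · rw [if_neg h0, if_neg h0]
    by_cases h1 : pvAnyIn ["sad", "melancholy", "depressed", "gloomy", "heartbroken"] (PySem.Str.lower sentence) = true
    · rw [if_pos h1, if_pos h1]
      try rfl
    · rw [if_neg h1, if_neg h1]
      by_cases h2 : pvAnyIn ["exciting", "energetic", "excited", "thrilling", "dynamic"] (PySem.Str.lower sentence) = true
      · rw [if_pos h2, if_pos h2]
        try rfl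
      · rw [if_neg h2, if_neg h2]
        by_cases h3 : pvAnyIn ["tired", "sleepy", "exhausted", "rest", "relax"] (PySem.Str.lower sentence) = true
        · rw [if_pos h3, if_pos h3]
          try rfl
        · rw [if_neg h3, if_neg h3]
          by_cases h4 : pvAnyIn ["surprise", "amazed", "wow", "astonished", "shocked"] (PySem.Str.lower sentence) = true
          · rw [if_pos h4, if_pos h4]
            try rfl
          · rw [if_neg h4, if_neg h4]
            by_cases h5 : pvAnyIn ["love", "affection", "romance", "caring", "affectionate"] (PySem.Str.lower sentence) = true
            · rw [if_pos h5, if_pos h5]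
              try rfl
            · rw [if_neg h5, if_neg h5]
              by_cases h6 : pvAnyIn ["anger", "mad", "furious", "rage", "irate"] (PySem.Str.lower sentence) = true
              · rw [if_pos h6, if_pos h6]
                try rfl
              · rw [if_neg h6, if_neg h6]
                by_cases h7 : pvAnyIn ["nature", "forest", "mountains", "lake", "river", "garden", "park"] (PySem.Str.lower sentence) = true
                · rw [if_pos h7, if_pos h7]
                  try rfl
                · rw [if_neg h7, if_neg h7]
                  by_cases h8 : pvAnyIn ["city", "urban", "building", "street", "metropolis", "skyscraper"] (PySem.Str.lower sentence) = true
                  · rw [if_pos h8, if_pos h8]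
                    try rfl
                  · rw [if_neg h8, if_neg h8]
                    by_cases h9 : pvAnyIn ["technology", "computer", "digital", "robot", "ai", "future"] (PySem.Str.lower sentence) = true
                    · rw [if_pos h9, if_pos h9]
                      try rfl
                    · rw [if_neg h9, if_neg h9]
                      by_cases h10 : pvAnyIn ["food", "meal", "restaurant", "cooking", "delicious"] (PySem.Str.lower sentence) = true
                      · rw [if_pos h10, if_pos h10]
                        try rfl
                      · rw [if_neg h10, if_neg h10]
                        by_cases h11 : pvAnyIn ["music", "concert", "song", "instrument", "singing"] (PySem.Str.lower sentence) = true
                        · rw [if_pos h11, if_pos h11]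
                          try rfl
                        · rw [if_neg h11, if_neg h11]
                          by_cases h12 : pvAnyIn ["sports", "game", "exercise", "competition", "athletic"] (PySem.Str.lower sentence) = true
                          · rw [if_pos h12, if_pos h12]
                            try rfl
                          · rw [if_neg h12, if_neg h12]
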